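-- pv_equiv track=rewrite | github.com/benard3360-star/Monitor | api/views.py | _detect_label_column
-- ===== SOURCE A (Python) =====
-- def _detect_label_column(rows):
--     if not rows:
--         return None
--     first = rows[0]
--     for key in first.keys():
--         if "is_laundering" in str(key).strip().lower():
--             return key
--     # fallback common names
--     for key in first.keys():
--         lowered = str(key).strip().lower()
--         if lowered in ("label", "target", "y", "isfraud", "fraud"):
--             return key
--     return None
-- ===== SOURCE B (Python) =====
-- def _detect_label_column(rows):
--     # Single pass keeping a fallback candidate instead of two sequential scans.
--     if not rows:
--         return None
--     fallback = None
--     for key in rows[0].keys():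
--         lowered = str(key).strip().lower()
--         if "is_laundering" in lowered:
--             return key
--         if fallback is None and lowered in ("label", "target", "y", "isfraud", "fraud"):
--             fallback = key
--     return fallback
-- ===== Notes on version B (the rewrite author's own statement) =====
-- stated objective: alternative
-- what changed: Replaces A's two sequential scans over the keys with one single pass that returns immediately on an 'is_laundering' match and otherwise remembers the first fallback-named key in an accumulator returned after the loop.
import Mathlib
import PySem

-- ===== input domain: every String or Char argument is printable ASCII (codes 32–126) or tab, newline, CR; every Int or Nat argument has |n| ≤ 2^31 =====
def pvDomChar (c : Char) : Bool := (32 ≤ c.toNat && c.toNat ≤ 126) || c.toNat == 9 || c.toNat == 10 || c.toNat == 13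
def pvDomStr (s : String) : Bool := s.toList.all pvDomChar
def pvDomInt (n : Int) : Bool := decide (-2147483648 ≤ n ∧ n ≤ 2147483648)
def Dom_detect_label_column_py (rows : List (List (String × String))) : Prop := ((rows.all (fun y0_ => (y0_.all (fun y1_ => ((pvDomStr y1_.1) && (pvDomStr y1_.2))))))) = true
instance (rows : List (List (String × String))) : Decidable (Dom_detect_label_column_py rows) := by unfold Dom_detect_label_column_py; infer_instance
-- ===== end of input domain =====

-- B replaces A's two sequential key scans by one pass that keeps a fallback candidate; return values are proved equal (objective: alternative decomposition).

-- ===== PORT A =====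
-- "is_laundering" in str(key).strip().lower()
def pvIsLaund (key : String) : Bool :=
  PySem.Str.isIn "is_laundering" (PySem.Str.lower (PySem.Str.strip key))

-- str(key).strip().lower() in ("label", "target", "y", "isfraud", "fraud")
def pvIsFallback (key : String) : Bool :=
  ["label", "target", "y", "isfraud", "fraud"].contains (PySem.Str.lower (PySem.Str.strip key))

-- first loop of A
def pvLoop1 : List String → Option String
  | [] => none
  | k :: rest => if pvIsLaund k then some k else pvLoop1 rest

-- second (fallback) loop of A
def pvLoop2 : List String → Option String
  | [] => none
  | k :: rest => if pvIsFallback k then some k else pvLoop2 rest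

def detect_label_column_py (rows : List (List (String × String))) : Option String :=
  match rows with
  | [] => none
  | first :: _ =>
    let keys := first.map (·.1)
    match pvLoop1 keys with
    | some k => some k
    | none => pvLoop2 keys

-- ===== PORT B =====
-- single pass with a fallback accumulator
def pvLoopB : List String → Option String → Option String
  | [], fb => fb
  | k :: rest, fb =>
    let lowered := PySem.Str.lower (PySem.Str.strip k)
    if PySem.Str.isIn "is_laundering" lowered then some k
    else pvLoopB rest
      (if fb.isNone && ["label", "target", "y", "isfraud", "fraud"].contains lowered then some k else fb)

def detect_label_column_py_alt (rows : List (List (String × String))) : Option String :=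
  match rows with
  | [] => none
  | first :: _ => pvLoopB (first.map (·.1)) none

-- ===== PRECONDITION & SPEC =====
def Spec_detect_label_column_py (rows : List (List (String × String))) (out : Option String) : Prop := out = detect_label_column_py_alt rows
instance (rows : List (List (String × String))) (out : Option String) : Decidable (Spec_detect_label_column_py rows out) := by unfold Spec_detect_label_column_py; infer_instance

-- ===== CLAIM (what is proved, stated in full; the proofs are below) =====
def Claim_equal_detect_label_column_py : Prop := ∀ (rows : List (List (String × String))), Dom_detect_label_column_py rows → Spec_detect_label_column_py rows (detect_label_column_py rows)

-- ===== LEMMAS AND PROOFS =====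

theorem pvLoopB_eq (ks : List String) (fb : Option String) :
    pvLoopB ks fb =
      match pvLoop1 ks with
      | some k => some k
      | none => match fb with | some x => some x | none => pvLoop2 ks := by
  induction ks generalizing fb with
  | nil => cases fb <;> simp [pvLoopB, pvLoop1, pvLoop2]
  | cons k rest ih =>
    have e1 : PySem.Str.isIn "is_laundering" (PySem.Str.lower (PySem.Str.strip k)) = pvIsLaund k := rfl
    have e2 : ["label", "target", "y", "isfraud", "fraud"].contains (PySem.Str.lower (PySem.Str.strip k)) = pvIsFallback k := rfl
    simp only [pvLoopB, pvLoop1, pvLoop2, e1, e2]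
    cases h1 : pvIsLaund k with
    | true => simp
    | false =>
      simp only [Bool.false_eq_true, if_false, ih]
      cases fb with
      | some x => simp
      | none => cases h2 : pvIsFallback k <;> simp

-- ===== VERDICT (by name: the statement is the Claim_ definition above) =====
theorem detect_label_column_py_spec : Claim_equal_detect_label_column_py := by
  intro rows _
  unfold Spec_detect_label_column_py detect_label_column_py detect_label_column_py_alt
  cases rows with
  | nil => rfl
  | cons first rest =>
    simp only [pvLoopB_eq]
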